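-- pv_equiv track=rewrite | github.com/sftfjugg/tone-web | tone/services/job/offline_data_services.py | get_case_state
-- ===== SOURCE A (Python) =====
-- def get_case_state(results, test_type):
--     state = 'success'
--     if test_type == 0:
--         fail_count = 0
--         skip_count = 0
--         success_count = 0
--         for item in results:
--             if 'Pass' in item['matrix']:
--                 success_count += 1
--             if 'Fail' in item['matrix']:
--                 fail_count += 1
--             if 'Skip' in item['matrix']:
--                 skip_count += 1
--         if fail_count == 0 and success_count == 0 and skip_count > 0:
--             state = 'skip'
--         if fail_count > 0:
--             state = 'fail'
--         if fail_count == 0 and success_count > 0: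
--             state = 'success'
--     return state
-- ===== SOURCE B (Python) =====
-- def get_case_state(results, test_type):
--     if test_type != 0:
--         return 'success'
--     matrices = [item['matrix'] for item in results]
--     if any('Fail' in m for m in matrices):
--         return 'fail'
--     if any('Pass' in m for m in matrices):
--         return 'success'
--     if any('Skip' in m for m in matrices):
--         return 'skip'
--     return 'success'
-- ===== Notes on version B (the rewrite author's own statement) =====
-- stated objective: simpler
-- what changed: Replaces the counting loop plus the three-conditional state cascade with existence tests (any) and an early-return priority chain fail > success > skip.
import Mathlib
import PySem

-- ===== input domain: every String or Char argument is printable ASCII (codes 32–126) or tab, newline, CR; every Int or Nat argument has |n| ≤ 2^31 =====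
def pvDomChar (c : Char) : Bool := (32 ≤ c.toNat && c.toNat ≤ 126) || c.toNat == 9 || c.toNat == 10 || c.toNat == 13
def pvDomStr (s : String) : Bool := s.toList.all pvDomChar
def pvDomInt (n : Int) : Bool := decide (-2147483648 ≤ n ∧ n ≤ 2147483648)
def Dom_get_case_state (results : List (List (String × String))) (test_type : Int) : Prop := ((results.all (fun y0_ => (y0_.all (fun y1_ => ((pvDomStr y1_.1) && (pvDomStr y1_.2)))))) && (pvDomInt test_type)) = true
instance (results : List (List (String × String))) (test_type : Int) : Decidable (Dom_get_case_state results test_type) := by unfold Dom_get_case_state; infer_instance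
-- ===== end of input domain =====

-- ===== PORT A =====
-- B replaces A's counting loop + conditional cascade with any-existence tests and a priority chain (objective: simpler).
-- item['matrix'] : first-match lookup in the association list; KeyError (none) when the key is absent — excluded by Pre_.
def pvMatrix (item : List (String × String)) : Option String :=
  List.lookup "matrix" item

def get_case_state (results : List (List (String × String))) (test_type : Int) : String :=
  if test_type = 0 then
    let counts := results.foldl
      (fun (c : Int × Int × Int) item =>
        let m := (pvMatrix item).getD ""
        let c := if PySem.Str.isIn "Pass" m then (c.1 + 1, c.2.1, c.2.2) else c
        let c := if PySem.Str.isIn "Fail" m then (c.1, c.2.1 + 1, c.2.2) else c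
        if PySem.Str.isIn "Skip" m then (c.1, c.2.1, c.2.2 + 1) else c)
      (0, 0, 0)
    let success_count := counts.1
    let fail_count := counts.2.1
    let skip_count := counts.2.2
    let state := "success"
    let state := if fail_count = 0 ∧ success_count = 0 ∧ skip_count > 0 then "skip" else state
    let state := if fail_count > 0 then "fail" else state
    let state := if fail_count = 0 ∧ success_count > 0 then "success" else state
    state
  else "success"

-- ===== PORT B =====
def get_case_state_alt (results : List (List (String × String))) (test_type : Int) : String :=
  if test_type ≠ 0 then "success"
  else
    let matrices := results.map (fun item => (pvMatrix item).getD "")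
    if matrices.any (fun m => PySem.Str.isIn "Fail" m) then "fail"
    else if matrices.any (fun m => PySem.Str.isIn "Pass" m) then "success"
    else if matrices.any (fun m => PySem.Str.isIn "Skip" m) then "skip"
    else "success"

-- ===== PRECONDITION & SPEC =====
-- A (and B) raise KeyError when test_type == 0 and some item lacks the 'matrix' key; Pre_ excludes exactly those inputs.
def Pre_get_case_state (results : List (List (String × String))) (test_type : Int) : Prop :=
  test_type = 0 → ∀ item ∈ results, (List.lookup "matrix" item).isSome

instance (results : List (List (String × String))) (test_type : Int) : Decidable (Pre_get_case_state results test_type) := by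
  unfold Pre_get_case_state; infer_instance

def pvWitness_get_case_state : (List (List (String × String))) × Int :=
  ([[("matrix", "Pass")], [("matrix", "Skip")]], 0)

def Spec_get_case_state (results : List (List (String × String))) (test_type : Int) (out : String) : Prop := out = get_case_state_alt results test_type
instance (results : List (List (String × String))) (test_type : Int) (out : String) : Decidable (Spec_get_case_state results test_type out) := by unfold Spec_get_case_state; infer_instance

-- ===== CLAIM (what is proved, stated in full; the proofs are below) =====
def Claim_equal_get_case_state : Prop := ∀ (results : List (List (String × String))) (test_type : Int), Dom_get_case_state results test_type → Pre_get_case_state results test_type → Spec_get_case_state results test_type (get_case_state results test_type)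

-- ===== LEMMAS AND PROOFS =====
-- A's fold computes (a,b,c) plus the three countP's of the matrix predicates.
theorem pv_fold_counts (results : List (List (String × String))) (a b c : Int) :
    results.foldl
      (fun (c : Int × Int × Int) item =>
        let m := (pvMatrix item).getD ""
        let c := if PySem.Str.isIn "Pass" m then (c.1 + 1, c.2.1, c.2.2) else c
        let c := if PySem.Str.isIn "Fail" m then (c.1, c.2.1 + 1, c.2.2) else c
        if PySem.Str.isIn "Skip" m then (c.1, c.2.1, c.2.2 + 1) else c)
      (a, b, c)
    = (a + results.countP (fun item => PySem.Str.isIn "Pass" ((pvMatrix item).getD "")),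
       b + results.countP (fun item => PySem.Str.isIn "Fail" ((pvMatrix item).getD "")),
       c + results.countP (fun item => PySem.Str.isIn "Skip" ((pvMatrix item).getD ""))) := by
  induction results generalizing a b c with
  | nil => simp
  | cons hd tl ih =>
    simp only [List.foldl_cons, List.countP_cons]
    rw [ih]
    split_ifs <;> simp <;> omega

theorem pv_countP_pos_iff_any {α : Type} (l : List α) (p : α → Bool) :
    (0 < (l.countP p : Int)) ↔ l.any p = true := by
  rw [List.any_eq_true]
  simp only [Int.natCast_pos, List.countP_pos_iff]

-- ===== VERDICT (by name: the statement is the Claim_ definition above) =====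
theorem get_case_state_spec : Claim_equal_get_case_state := by
  intro results test_type _ _
  unfold Spec_get_case_state get_case_state get_case_state_alt
  by_cases ht : test_type = 0
  · simp only [ht, ne_eq, not_true_eq_false, if_false]
    rw [pv_fold_counts]
    simp only [zero_add, List.any_map, Function.comp_def]
    simp only [← pv_countP_pos_iff_any]
    split_ifs <;> first | rfl | omega
  · simp [ht]
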